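-- pv_equiv track=rewrite | github.com/lukeahwilson/solving-practice-problems | int_optimal_flight.py | optimal_flight
-- ===== SOURCE A (Python) =====
-- def optimal_flight(forward, backward, max_distance):
--
--     forward = sorted(forward, key=lambda x: x[1]) #O(nlogn)
--     backward = sorted(backward, key=lambda x: x[1]) #O(mlogm)
--     left = 0
--     right = len(backward) - 1
--     distance = 0
--     optimal_flights = []
--
--     while left < len(forward) and right >= 0:
--         if forward[left][1] + backward[right][1] > max_distance:
--             right -= 1
--         elif forward[left][1] + backward[right][1] > distance:
--             distance = forward[left][1] + backward[right][1]
--             optimal_flights = [[forward[left][0], backward[right][0]]]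
--             left += 1
--         elif forward[left][1] + backward[right][1] == distance:
--             optimal_flights.append([forward[left][0], backward[right][0]])
--             left += 1
--         else:
--             left += 1
--
--     return optimal_flights
-- ===== SOURCE B (Python) =====
-- def optimal_flight(forward, backward, max_distance):
--     fwd = sorted(forward, key=lambda x: x[1])
--     bwd = sorted(backward, key=lambda x: x[1])
--     candidates = []
--     for f in fwd:
--         fits = [b for b in bwd if b[1] <= max_distance - f[1]]
--         if fits:
--             b = fits[-1]
--             candidates.append((f[1] + b[1], [f[0], b[0]]))
--     best = max([0] + [s for s, _ in candidates])
--     return [pair for s, pair in candidates if s == best]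
-- ===== Notes on version B (the rewrite author's own statement) =====
-- stated objective: alternative
-- what changed: Replaces A's simultaneous two-pointer sweep with its running-max/reset accumulator by an independent per-forward search for the farthest fitting backward flight, then a single max computation and a filter for the pairs attaining it.
import Mathlib
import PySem

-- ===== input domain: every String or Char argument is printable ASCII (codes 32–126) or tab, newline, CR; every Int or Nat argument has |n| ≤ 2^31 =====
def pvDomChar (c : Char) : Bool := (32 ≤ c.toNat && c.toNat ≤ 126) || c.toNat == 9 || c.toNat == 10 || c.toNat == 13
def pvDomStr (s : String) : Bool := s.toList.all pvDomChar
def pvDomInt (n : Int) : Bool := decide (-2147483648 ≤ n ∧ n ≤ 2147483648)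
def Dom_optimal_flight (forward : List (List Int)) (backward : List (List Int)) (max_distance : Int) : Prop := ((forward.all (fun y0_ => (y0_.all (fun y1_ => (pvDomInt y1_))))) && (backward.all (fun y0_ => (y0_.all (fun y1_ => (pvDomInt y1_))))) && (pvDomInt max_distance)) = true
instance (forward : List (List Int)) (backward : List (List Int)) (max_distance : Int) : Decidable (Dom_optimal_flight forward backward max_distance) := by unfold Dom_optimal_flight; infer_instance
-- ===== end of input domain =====

-- B replaces A's simultaneous two-pointer sweep (with its running-max reset list) by an
-- independent per-forward search for the farthest fitting backward flight, then a max + filter;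
-- objective: alternative (clearer decomposition, same sort-dominated cost on typical inputs).

-- ===== PORT A =====
-- x[1] / x[0] are ported as getD; inside Pre_ every row has length ≥ 2, so this equals Python's indexing.
def pvLoopA (f' b' : List (List Int)) (m : Int) (left : Nat) (right : Int) (d : Int)
    (acc : List (List Int)) : List (List Int) :=
  if h : left < f'.length ∧ 0 ≤ right then
    let fl := (f'.getD left []).getD 1 0
    let br := (b'.getD right.toNat []).getD 1 0
    if fl + br > m then
      pvLoopA f' b' m left (right - 1) d acc
    else if fl + br > d then
      pvLoopA f' b' m (left + 1) right (fl + br)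
        [[(f'.getD left []).getD 0 0, (b'.getD right.toNat []).getD 0 0]]
    else if fl + br = d then
      pvLoopA f' b' m (left + 1) right d
        (acc ++ [[(f'.getD left []).getD 0 0, (b'.getD right.toNat []).getD 0 0]])
    else
      pvLoopA f' b' m (left + 1) right d acc
  else acc
termination_by (f'.length - left) + (right + 1).toNat
decreasing_by
  · omega
  · omega
  · omega
  · omega

def optimal_flight (forward : List (List Int)) (backward : List (List Int)) (max_distance : Int) : List (List Int) :=
  let f' := PySem.List.sorted forward (fun x => x.getD 1 0)
  let b' := PySem.List.sorted backward (fun x => x.getD 1 0)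
  pvLoopA f' b' max_distance 0 ((b'.length : Int) - 1) 0 []

-- ===== PORT B =====
-- per-forward candidate: the last backward flight that still fits (fits[-1] = getLast?)
def pvCand (bwd : List (List Int)) (m : Int) (f : List Int) : Option (Int × List Int) :=
  let fits := bwd.filter (fun b => b.getD 1 0 ≤ m - f.getD 1 0)
  match fits.getLast? with
  | some b => some (f.getD 1 0 + b.getD 1 0, [f.getD 0 0, b.getD 0 0])
  | none => none

def optimal_flight_alt (forward : List (List Int)) (backward : List (List Int)) (max_distance : Int) : List (List Int) :=
  let fwd := PySem.List.sorted forward (fun x => x.getD 1 0)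
  let bwd := PySem.List.sorted backward (fun x => x.getD 1 0)
  let candidates := fwd.filterMap (pvCand bwd max_distance)
  let best := (candidates.map Prod.fst).foldl max 0
  (candidates.filter (fun c => c.1 == best)).map Prod.snd

-- ===== PRECONDITION & SPEC =====
-- Pre_ excludes exactly the inputs where Python A raises IndexError: a row with fewer than
-- 2 entries makes the sort key x[1] (or the pairing x[0]) raise; B raises there too.
def Pre_optimal_flight (forward : List (List Int)) (backward : List (List Int)) (max_distance : Int) : Prop :=
  (∀ l ∈ forward, 2 ≤ l.length) ∧ (∀ l ∈ backward, 2 ≤ l.length)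
instance (forward : List (List Int)) (backward : List (List Int)) (max_distance : Int) : Decidable (Pre_optimal_flight forward backward max_distance) := by unfold Pre_optimal_flight; infer_instance

def pvWitness_optimal_flight : List (List Int) × List (List Int) × Int := ([[1, 2], [3, 4]], [[5, 6], [7, 1]], 8)

def Spec_optimal_flight (forward : List (List Int)) (backward : List (List Int)) (max_distance : Int) (out : List (List Int)) : Prop := out = optimal_flight_alt forward backward max_distance
instance (forward : List (List Int)) (backward : List (List Int)) (max_distance : Int) (out : List (List Int)) : Decidable (Spec_optimal_flight forward backward max_distance out) := by unfold Spec_optimal_flight; infer_instance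

-- ===== CLAIM (what is proved, stated in full; the proofs are below) =====
def Claim_equal_optimal_flight : Prop := ∀ (forward : List (List Int)) (backward : List (List Int)) (max_distance : Int), Dom_optimal_flight forward backward max_distance → Pre_optimal_flight forward backward max_distance → Spec_optimal_flight forward backward max_distance (optimal_flight forward backward max_distance)

-- ===== LEMMAS AND PROOFS =====

-- Abstract "running max / reset" accumulator of A, over an explicit candidate list.
def pvCollect : List (Int × List Int) → Int → List (List Int) → List (List Int)
  | [], _, acc => acc
  | c :: cs, d, acc =>
    if c.1 > d then pvCollect cs c.1 [c.2]
    else if c.1 = d then pvCollect cs d (acc ++ [c.2])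
    else pvCollect cs d acc

theorem le_foldl_max (l : List Int) (d : Int) : d ≤ l.foldl max d := by
  induction l generalizing d with
  | nil => simp
  | cons x xs ih => exact le_trans (le_max_left d x) (ih (max d x))

theorem pvCollect_eq (cs : List (Int × List Int)) (d : Int) (acc : List (List Int)) :
    pvCollect cs d acc =
      (if (cs.map Prod.fst).foldl max d = d then acc else []) ++
        (cs.filter (fun c => c.1 == (cs.map Prod.fst).foldl max d)).map Prod.snd := by
  induction cs generalizing d acc with
  | nil => simp [pvCollect]
  | cons c cs ih =>
    simp only [List.map_cons, List.foldl_cons, List.filter_cons]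
    by_cases h1 : c.1 > d
    · have hmax : max d c.1 = c.1 := by omega
      have hle := le_foldl_max (List.map Prod.fst cs) c.1
      simp only [hmax]
      have hne : ¬ (List.foldl max c.1 (List.map Prod.fst cs) = d) := by omega
      simp only [pvCollect, if_pos h1, ih, if_neg hne, List.nil_append]
      by_cases h2 : c.1 = List.foldl max c.1 (List.map Prod.fst cs)
      · simp [← h2]
      · have hne2 : ¬ (List.foldl max c.1 (List.map Prod.fst cs) = c.1) := fun h => h2 h.symm
        simp [h2, hne2]
    · by_cases h2 : c.1 = d
      · have hmax : max d c.1 = d := by omega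
        have hle := le_foldl_max (List.map Prod.fst cs) d
        simp only [hmax]
        simp only [pvCollect, if_neg h1, if_pos h2, ih]
        by_cases h3 : List.foldl max d (List.map Prod.fst cs) = d
        · simp [h3, h2]
        · have hc : ¬ (c.1 = List.foldl max d (List.map Prod.fst cs)) := by omega
          simp [h3, hc]
      · have hlt : c.1 < d := by omega
        have hmax : max d c.1 = d := by omega
        have hle := le_foldl_max (List.map Prod.fst cs) d
        simp only [hmax]
        simp only [pvCollect, if_neg h1, if_neg h2, ih]
        have hc : ¬ (c.1 = List.foldl max d (List.map Prod.fst cs)) := by omega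
        simp [hc]

theorem pvCollect_cons (s : Int) (p : List Int) (cs : List (Int × List Int)) (d : Int)
    (acc : List (List Int)) :
    pvCollect ((s, p) :: cs) d acc =
      if s > d then pvCollect cs s [p]
      else if s = d then pvCollect cs d (acc ++ [p])
      else pvCollect cs d acc := rfl

-- If no backward flight fits the threshold of f, f yields no candidate.
theorem pvCand_none (b' : List (List Int)) (m : Int) (f : List Int)
    (h : ∀ j : Nat, (hj : j < b'.length) → m - f.getD 1 0 < b'[j].getD 1 0) :
    pvCand b' m f = none := by
  have hfil : b'.filter (fun b => b.getD 1 0 ≤ m - f.getD 1 0) = [] := by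
    refine List.filter_eq_nil_iff.mpr ?_
    intro a ha
    obtain ⟨j, hj, rfl⟩ := List.mem_iff_getElem.mp ha
    simpa using not_le.mpr (h j hj)
  simp only [pvCand, hfil]
  rfl

-- On a sorted list, if b'[r] fits and everything past r does not, b'[r] is the last fitting element.
theorem pvCand_some (b' : List (List Int))
    (hb : b'.Pairwise (fun a b => a.getD 1 0 ≤ b.getD 1 0))
    (m : Int) (f : List Int) (r : Nat) (hr : r < b'.length)
    (hle : b'[r].getD 1 0 ≤ m - f.getD 1 0)
    (hgt : ∀ j : Nat, (hj : j < b'.length) → r < j → m - f.getD 1 0 < b'[j].getD 1 0) :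
    pvCand b' m f = some (f.getD 1 0 + b'[r].getD 1 0, [f.getD 0 0, b'[r].getD 0 0]) := by
  have hbg := List.pairwise_iff_getElem.mp hb
  have hsplit := List.take_append_drop (r + 1) b'
  have hfil : b'.filter (fun b => b.getD 1 0 ≤ m - f.getD 1 0) = b'.take (r + 1) := by
    conv_lhs => rw [← hsplit]
    rw [List.filter_append]
    have h1 : (b'.take (r + 1)).filter (fun b => b.getD 1 0 ≤ m - f.getD 1 0) = b'.take (r + 1) := by
      refine List.filter_eq_self.mpr ?_
      intro a ha
      obtain ⟨i, hi, rfl⟩ := List.mem_iff_getElem.mp ha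
      have hi' : i < b'.length := lt_of_lt_of_le hi (by simp [List.length_take])
      have hir : i ≤ r := by
        have := hi; simp [List.length_take] at this; omega
      rw [List.getElem_take]
      rcases Nat.lt_or_eq_of_le hir with h | h
      · exact decide_eq_true (le_trans (hbg i r hi' hr h) hle)
      · subst h; exact decide_eq_true hle
    have h2 : (b'.drop (r + 1)).filter (fun b => b.getD 1 0 ≤ m - f.getD 1 0) = [] := by
      refine List.filter_eq_nil_iff.mpr ?_
      intro a ha
      obtain ⟨i, hi, rfl⟩ := List.mem_iff_getElem.mp ha
      have hi' : r + 1 + i < b'.length := by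
        have := hi; simp [List.length_drop] at this; omega
      rw [List.getElem_drop]
      simpa using not_le.mpr (hgt (r + 1 + i) hi' (by omega))
    rw [h1, h2, List.append_nil]
  have hlast : (b'.take (r + 1)).getLast? = some b'[r] := by
    rw [List.getLast?_eq_getElem?]
    have hlen : (b'.take (r + 1)).length = r + 1 := by simp [List.length_take]; omega
    rw [hlen]
    simp only [Nat.add_sub_cancel]
    rw [List.getElem?_take, if_pos (by omega), List.getElem?_eq_getElem hr]
  simp only [pvCand, hfil, hlast]

-- The two-pointer loop of A computes pvCollect over B's candidate list.
theorem pvLoopA_eq (f' b' : List (List Int)) (m : Int)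
    (hf : f'.Pairwise (fun a b => a.getD 1 0 ≤ b.getD 1 0))
    (hb : b'.Pairwise (fun a b => a.getD 1 0 ≤ b.getD 1 0)) :
    ∀ (n : Nat) (left : Nat) (right d : Int) (acc : List (List Int)),
      (f'.length - left) + (right + 1).toNat ≤ n →
      right < (b'.length : Int) → -1 ≤ right →
      (∀ j : Nat, (hj : j < b'.length) → (right : Int) < j →
        ∀ i : Nat, (hi : i < f'.length) → left ≤ i →
          m - (f'[i].getD 1 0) < (b'[j].getD 1 0)) →
      pvLoopA f' b' m left right d acc =
        pvCollect ((f'.drop left).filterMap (pvCand b' m)) d acc := by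
  have hfg := List.pairwise_iff_getElem.mp hf
  intro n
  induction n with
  | zero =>
    intro left right d acc hn hr1 hr2 hinv
    have hguard : ¬ (left < f'.length ∧ 0 ≤ right) := by omega
    rw [pvLoopA, dif_neg hguard, List.drop_eq_nil_of_le (by omega)]
    simp [pvCollect]
  | succ n ih =>
    intro left right d acc hn hr1 hr2 hinv
    by_cases hguard : left < f'.length ∧ 0 ≤ right
    · obtain ⟨hl, hr0⟩ := hguard
      have hrtc : (right.toNat : Int) = right := Int.toNat_of_nonneg hr0
      have hrt : right.toNat < b'.length := by omega
      have hfd : f'.getD left [] = f'[left] := by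
        rw [List.getD_eq_getElem?_getD, List.getElem?_eq_getElem hl]; rfl
      have hbd : b'.getD right.toNat [] = b'[right.toNat] := by
        rw [List.getD_eq_getElem?_getD, List.getElem?_eq_getElem hrt]; rfl
      rw [pvLoopA, dif_pos ⟨hl, hr0⟩]
      simp only [hfd, hbd]
      by_cases hbig : f'[left].getD 1 0 + b'[right.toNat].getD 1 0 > m
      · -- sum too large: move right pointer
        rw [if_pos hbig]
        refine ih left (right - 1) d acc (by omega) (by omega) (by omega) ?_
        intro j hj hjr i hi hli
        have hfi : f'[left].getD 1 0 ≤ f'[i].getD 1 0 := by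
          rcases Nat.lt_or_eq_of_le hli with h | h
          · exact hfg left i hl hi h
          · subst h; exact le_refl _
        by_cases hjr' : (right : Int) < j
        · exact hinv j hj hjr' i hi hli
        · have : j = right.toNat := by omega
          subst this
          omega
      · -- b'[right] fits f'[left]: it is f'[left]'s candidate partner
        rw [if_neg hbig]
        have hcand := pvCand_some b' hb m f'[left] right.toNat hrt (by omega)
          (fun j hj hjr => hinv j hj (by omega) left hl (le_refl _))
        have hstep : ∀ i : Nat, (hi : i < f'.length) → left + 1 ≤ i →
            ∀ j : Nat, (hj : j < b'.length) → (right : Int) < j →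
              m - (f'[i].getD 1 0) < (b'[j].getD 1 0) :=
          fun i hi hli j hj hjr => hinv j hj hjr i hi (by omega)
        rw [List.drop_eq_getElem_cons hl, List.filterMap_cons, hcand]
        have hdec : f'.length - (left + 1) + (right + 1).toNat ≤ n := by omega
        by_cases hgt : f'[left].getD 1 0 + b'[right.toNat].getD 1 0 > d
        · rw [if_pos hgt]
          rw [ih (left + 1) right _ _ hdec hr1 (by omega)
            (fun j hj hjr i hi hli => hstep i hi hli j hj hjr)]
          rw [pvCollect_cons, if_pos hgt]
        · rw [if_neg hgt]
          by_cases heq : f'[left].getD 1 0 + b'[right.toNat].getD 1 0 = d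
          · rw [if_pos heq]
            rw [ih (left + 1) right _ _ hdec hr1 (by omega)
              (fun j hj hjr i hi hli => hstep i hi hli j hj hjr)]
            rw [pvCollect_cons, if_neg hgt, if_pos heq]
          · rw [if_neg heq]
            rw [ih (left + 1) right _ _ hdec hr1 (by omega)
              (fun j hj hjr i hi hli => hstep i hi hli j hj hjr)]
            rw [pvCollect_cons, if_neg hgt, if_neg heq]
    · rw [pvLoopA, dif_neg hguard]
      rcases Nat.lt_or_ge left f'.length with hl | hl
      · -- right = -1: no remaining forward flight has a fitting backward flight
        have hrneg : right = -1 := by omega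
        have hnil : (f'.drop left).filterMap (pvCand b' m) = [] := by
          refine List.filterMap_eq_nil_iff.mpr ?_
          intro a ha
          obtain ⟨k, hk, rfl⟩ := List.mem_iff_getElem.mp ha
          have hk' : left + k < f'.length := by
            have := hk; simp [List.length_drop] at this; omega
          rw [List.getElem_drop]
          exact pvCand_none b' m _ (fun j hj =>
            hinv j hj (by omega) (left + k) hk' (by omega))
        rw [hnil]
        simp [pvCollect]
      · rw [List.drop_eq_nil_of_le hl]
        simp [pvCollect]

theorem optimal_flight_spec : Claim_equal_optimal_flight := by
  intro forward backward max_distance _ _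
  unfold Spec_optimal_flight optimal_flight optimal_flight_alt
  have hf := PySem.List.sorted_pairwise forward (fun x : List Int => x.getD 1 0)
  have hb := PySem.List.sorted_pairwise backward (fun x : List Int => x.getD 1 0)
  rw [pvLoopA_eq _ _ max_distance hf hb
      ((PySem.List.sorted forward (fun x => x.getD 1 0)).length +
        (PySem.List.sorted backward (fun x => x.getD 1 0)).length)
      0 _ 0 [] (by omega) (by omega) (by omega)
      (by intro j hj hjr i hi hli; omega)]
  rw [List.drop_zero, pvCollect_eq]
  simp [ite_self]
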